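-- pv_equiv track=rewrite | github.com/hpitta26/Shellhacks-2025 | fullstack_app/backend/translation_agency/agent.py | fallback_translation
-- ===== SOURCE A (Python) =====
-- def fallback_translation(text: str, target_language: str) -> str:
--     """Fallback translation using basic rules"""
--     if target_language == "Spanish":
--         basic_translations = {
--             "Shop Now": "Comprar Ahora",
--             "Start Training Now": "Empezar a Entrenar Ahora",
--             "Read More": "Leer Más",
--             "Login": "Iniciar Sesión",
--             "Sign Up": "Registrarse",
--             "Dashboard": "Panel",
--             "Settings": "Configuración"
--         }
--
--         translated_text = text
--         for eng, spa in basic_translations.items():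
--             if eng in translated_text:
--                 translated_text = translated_text.replace(eng, spa)
--         return translated_text
--
--     return text
-- ===== SOURCE B (Python) =====
-- def fallback_translation(text: str, target_language: str) -> str:
--     """Fallback translation using basic rules (single left-to-right scan)"""
--     if target_language != "Spanish":
--         return text
--     table = [
--         ("Shop Now", "Comprar Ahora"),
--         ("Start Training Now", "Empezar a Entrenar Ahora"),
--         ("Read More", "Leer Más"),
--         ("Login", "Iniciar Sesión"),
--         ("Sign Up", "Registrarse"),
--         ("Dashboard", "Panel"),
--         ("Settings", "Configuración"),
--     ]
--     out = []
--     i = 0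
--     n = len(text)
--     while i < n:
--         for eng, spa in table:
--             if text.startswith(eng, i):
--                 out.append(spa)
--                 i += len(eng)
--                 break
--         else:
--             out.append(text[i])
--             i += 1
--     return "".join(out)
-- ===== Notes on version B (the rewrite author's own statement) =====
-- stated objective: alternative
-- what changed: Replaces A's seven sequential full-string replace passes with a single left-to-right scan that, at each position, emits the Spanish value of the first matching English phrase (or the character), building the output once; equivalent because no key overlaps or is contained in another key or in any value.
import Mathlib
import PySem

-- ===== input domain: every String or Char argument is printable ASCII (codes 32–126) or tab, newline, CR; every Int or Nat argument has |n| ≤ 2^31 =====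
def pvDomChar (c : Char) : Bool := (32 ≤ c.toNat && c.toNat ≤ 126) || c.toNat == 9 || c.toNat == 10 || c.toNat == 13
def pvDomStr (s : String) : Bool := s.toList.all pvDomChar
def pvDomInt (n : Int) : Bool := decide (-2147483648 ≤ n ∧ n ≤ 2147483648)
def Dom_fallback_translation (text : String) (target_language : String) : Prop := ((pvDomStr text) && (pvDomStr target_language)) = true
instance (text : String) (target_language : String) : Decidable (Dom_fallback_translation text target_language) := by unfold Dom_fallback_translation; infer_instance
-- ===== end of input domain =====

-- B replaces A's seven sequential full-string replace passes with a single left-to-right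
-- scan emitting the Spanish value of the first phrase matching at each position
-- (objective: alternative single-pass algorithm; no speed claim).

-- ===== PORT A =====
def pvTableA : List (String × String) :=
  [("Shop Now", "Comprar Ahora"),
   ("Start Training Now", "Empezar a Entrenar Ahora"),
   ("Read More", "Leer Más"),
   ("Login", "Iniciar Sesión"),
   ("Sign Up", "Registrarse"),
   ("Dashboard", "Panel"),
   ("Settings", "Configuración")]

def fallback_translation (text : String) (target_language : String) : String :=
  if target_language == "Spanish" then
    pvTableA.foldl
      (fun acc p => if PySem.Str.isIn p.1 acc then PySem.Str.replace acc p.1 p.2 else acc)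
      text
  else text

-- ===== PORT B =====
def pvTableB : List (List Char × List Char) :=
  [("Shop Now".toList, "Comprar Ahora".toList),
   ("Start Training Now".toList, "Empezar a Entrenar Ahora".toList),
   ("Read More".toList, "Leer Más".toList),
   ("Login".toList, "Iniciar Sesión".toList),
   ("Sign Up".toList, "Registrarse".toList),
   ("Dashboard".toList, "Panel".toList),
   ("Settings".toList, "Configuración".toList)]

-- the while-loop of Source B: one left-to-right pass; fuel = remaining length (every table key is nonempty)
def pvScanGo (ps : List (List Char × List Char)) : Nat → List Char → List Char
  | _, [] => []
  | 0, _ :: _ => []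
  | fuel+1, c :: t =>
    match ps.find? (fun p => p.1.isPrefixOf (c :: t)) with
    | some p => p.2 ++ pvScanGo ps fuel ((c :: t).drop p.1.length)
    | none => c :: pvScanGo ps fuel t

def fallback_translation_alt (text : String) (target_language : String) : String :=
  if target_language != "Spanish" then text
  else String.ofList (pvScanGo pvTableB text.toList.length text.toList)

-- ===== PRECONDITION & SPEC =====
def Spec_fallback_translation (text : String) (target_language : String) (out : String) : Prop := out = fallback_translation_alt text target_language
instance (text : String) (target_language : String) (out : String) : Decidable (Spec_fallback_translation text target_language out) := by unfold Spec_fallback_translation; infer_instance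

-- ===== CLAIM (what is proved, stated in full; the proofs are below) =====
def Claim_equal_fallback_translation : Prop := ∀ (text : String) (target_language : String), Dom_fallback_translation text target_language → Spec_fallback_translation text target_language (fallback_translation text target_language)

-- ===== LEMMAS AND PROOFS =====

-- fuel-free view of the scanner
def pvScan (ps : List (List Char × List Char)) (l : List Char) : List Char :=
  pvScanGo ps l.length l

-- replace.go with enough fuel computes acc.reverse ++ replace
lemma pv_go_spec (old nw : List Char) (hne : old ≠ []) :
    ∀ fuel (l acc : List Char), l.length ≤ fuel →
      PySem.Chars.replace.go old nw fuel l acc = acc.reverse ++ PySem.Chars.replace l old nw := by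
  intro fuel
  induction fuel using Nat.strong_induction_on with
  | _ fuel ih =>
    intro l acc hlen
    cases l with
    | nil =>
      cases fuel with
      | zero =>
        rw [PySem.Chars.replace.go] <;> simp [PySem.Chars.replace, hne, PySem.Chars.replace.go]
      | succ f =>
        rw [PySem.Chars.replace.go] <;> simp [PySem.Chars.replace, hne, PySem.Chars.replace.go]
    | cons c t =>
      cases fuel with
      | zero => simp at hlen
      | succ f =>
        have hone : 1 ≤ old.length := by
          cases old with | nil => exact absurd rfl hne | cons a b => simp
        simp only [List.length_cons] at hlen
        by_cases hp : old.isPrefixOf (c :: t)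
        · rw [PySem.Chars.replace.go]
          simp only [hp, if_pos]
          have hdl : ((c :: t).drop old.length).length ≤ f := by
            simp only [List.length_drop, List.length_cons]; omega
          rw [ih f (by omega) _ _ hdl]
          have hrhs : PySem.Chars.replace (c :: t) old nw
              = nw ++ PySem.Chars.replace ((c :: t).drop old.length) old nw := by
            unfold PySem.Chars.replace
            simp only [List.isEmpty_iff, hne, List.length_cons]
            rw [PySem.Chars.replace.go]
            simp only [hp, if_pos]
            have hdl' : ((c :: t).drop old.length).length ≤ t.length := by
              simp only [List.length_drop, List.length_cons]; omega
            rw [ih t.length (by omega) _ _ hdl']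
            simp [PySem.Chars.replace, hne]
          rw [hrhs]; simp
        · rw [PySem.Chars.replace.go]
          simp only [hp, Bool.false_eq_true]
          have hlt : t.length ≤ f := by omega
          rw [ih f (by omega) _ _ hlt]
          have hrhs : PySem.Chars.replace (c :: t) old nw = c :: PySem.Chars.replace t old nw := by
            unfold PySem.Chars.replace
            simp only [List.isEmpty_iff, hne, List.length_cons]
            rw [PySem.Chars.replace.go]
            simp only [hp, Bool.false_eq_true]
            rw [ih t.length (by omega) _ _ (le_refl _)]
            simp [PySem.Chars.replace, hne]
          rw [hrhs]; simp

lemma pv_rep_nil (old nw : List Char) (hne : old ≠ []) :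
    PySem.Chars.replace [] old nw = [] := by
  simp [PySem.Chars.replace, hne, PySem.Chars.replace.go]

lemma pv_rep_pos (old nw l : List Char) (hne : old ≠ []) (hp : old.isPrefixOf l = true) :
    PySem.Chars.replace l old nw = nw ++ PySem.Chars.replace (l.drop old.length) old nw := by
  match l with
  | [] =>
    have : old <+: ([] : List Char) := List.isPrefixOf_iff_prefix.mp hp
    simp [List.prefix_nil] at this
    exact absurd this hne
  | c :: t =>
    unfold PySem.Chars.replace
    simp only [List.isEmpty_iff, hne, List.length_cons]
    rw [PySem.Chars.replace.go]
    simp only [hp, if_pos]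
    have hone : 1 ≤ old.length := by
      cases old with | nil => exact absurd rfl hne | cons a b => simp
    have hdl : ((c :: t).drop old.length).length ≤ t.length := by
      simp [List.length_drop]; omega
    rw [pv_go_spec old nw hne t.length _ _ hdl]
    simp [PySem.Chars.replace, hne]

lemma pv_rep_neg (old nw : List Char) (c : Char) (t : List Char) (hne : old ≠ [])
    (hp : old.isPrefixOf (c :: t) = false) :
    PySem.Chars.replace (c :: t) old nw = c :: PySem.Chars.replace t old nw := by
  unfold PySem.Chars.replace
  simp only [List.isEmpty_iff, hne, List.length_cons]
  rw [PySem.Chars.replace.go]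
  simp only [hp, Bool.false_eq_true]
  rw [pv_go_spec old nw hne t.length t [c] (le_refl _)]
  simp [PySem.Chars.replace, hne]

-- replace is the identity when the key does not occur
lemma pv_rep_not_in (old nw l : List Char) (hne : old ≠ [])
    (h : PySem.Chars.isIn old l = false) :
    PySem.Chars.replace l old nw = l := by
  induction l with
  | nil => exact pv_rep_nil old nw hne
  | cons c t ih =>
    have hinf : ¬ old <:+: (c :: t) := (PySem.Chars.isIn_eq_false_iff old (c :: t)).mp h
    have hp : old.isPrefixOf (c :: t) = false := by
      by_contra hcon
      simp only [Bool.not_eq_false] at hcon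
      exact hinf (List.isPrefixOf_iff_prefix.mp hcon).isInfix
    have ht : PySem.Chars.isIn old t = false := by
      rw [PySem.Chars.isIn_eq_false_iff old t]
      intro hti; exact hinf (List.infix_cons hti)
    rw [pv_rep_neg old nw c t hne hp, ih ht]

-- replace skips over a block u in which the key cannot start
lemma pv_rep_append (old nw : List Char) (hne : old ≠ []) :
    ∀ (u X : List Char),
      (∀ j, j < u.length → ¬ old <+: (u.drop j ++ X)) →
      PySem.Chars.replace (u ++ X) old nw = u ++ PySem.Chars.replace X old nw := by
  intro u
  induction u with
  | nil => intro X _; simp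
  | cons c u' ih =>
    intro X h
    have hp : old.isPrefixOf ((c :: u') ++ X) = false := by
      by_contra hcon
      simp only [Bool.not_eq_false] at hcon
      exact h 0 (by simp) (by simpa using List.isPrefixOf_iff_prefix.mp hcon)
    have : PySem.Chars.replace (c :: (u' ++ X)) old nw
        = c :: PySem.Chars.replace (u' ++ X) old nw :=
      pv_rep_neg old nw c (u' ++ X) hne (by simpa using hp)
    simp only [List.cons_append]
    rw [this, ih X (fun j hj => by simpa using h (j+1) (by simp; omega))]

-- the scanner's value does not depend on the fuel, once sufficient
lemma pv_scanGo_fuel (ps : List (List Char × List Char)) (hne : ∀ p ∈ ps, p.1 ≠ []) :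
    ∀ fuel fuel' (l : List Char), l.length ≤ fuel → l.length ≤ fuel' →
      pvScanGo ps fuel l = pvScanGo ps fuel' l := by
  intro fuel
  induction fuel with
  | zero =>
    intro fuel' l h _
    have : l = [] := List.length_eq_zero_iff.mp (by omega)
    subst this; cases fuel' <;> simp [pvScanGo]
  | succ f ih =>
    intro fuel' l h h'
    cases l with
    | nil => cases fuel' <;> simp [pvScanGo]
    | cons c t =>
      cases fuel' with
      | zero => simp at h'
      | succ f' =>
        simp only [pvScanGo]
        cases hf : ps.find? (fun p => p.1.isPrefixOf (c :: t)) with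
        | none =>
          simp only []
          have := ih f' t (by simp at h; omega) (by simp at h'; omega)
          rw [this]
        | some p =>
          simp only []
          have hmem := List.mem_of_find?_eq_some hf
          have hone : 1 ≤ p.1.length := by
            have := hne p hmem
            cases hp1 : p.1 with
            | nil => exact absurd hp1 this
            | cons a b => simp
          have hlen : ((c :: t).drop p.1.length).length ≤ f := by
            simp [List.length_drop]; simp at h; omega
          have hlen' : ((c :: t).drop p.1.length).length ≤ f' := by
            simp [List.length_drop]; simp at h'; omega
          rw [ih f' _ hlen hlen']

lemma pv_scan_nil (ps : List (List Char × List Char)) : pvScan ps [] = [] := by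
  simp [pvScan, pvScanGo]

lemma pv_scan_cons_some (ps : List (List Char × List Char)) (hne : ∀ p ∈ ps, p.1 ≠ [])
    (c : Char) (t : List Char) (p : List Char × List Char)
    (hf : ps.find? (fun p => p.1.isPrefixOf (c :: t)) = some p) :
    pvScan ps (c :: t) = p.2 ++ pvScan ps ((c :: t).drop p.1.length) := by
  unfold pvScan
  simp only [List.length_cons, pvScanGo, hf]
  congr 1
  have hone : 1 ≤ p.1.length := by
    have := hne p (List.mem_of_find?_eq_some hf)
    cases hp1 : p.1 with
    | nil => exact absurd hp1 this
    | cons a b => simp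
  exact pv_scanGo_fuel ps hne t.length _ _ (by simp [List.length_drop]; omega) (le_refl _)

lemma pv_scan_cons_none (ps : List (List Char × List Char))
    (c : Char) (t : List Char)
    (hf : ps.find? (fun p => p.1.isPrefixOf (c :: t)) = none) :
    pvScan ps (c :: t) = c :: pvScan ps t := by
  unfold pvScan
  simp only [List.length_cons, pvScanGo, hf]

lemma pv_scan_empty (l : List Char) : pvScan [] l = l := by
  induction l with
  | nil => exact pv_scan_nil []
  | cons c t ih => rw [pv_scan_cons_none [] c t (by simp), ih]

-- the scanner walks through a block u in which no key can start
lemma pv_scan_through (ps : List (List Char × List Char)) (hne : ∀ p ∈ ps, p.1 ≠ []) :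
    ∀ (u X : List Char),
      (∀ j, j < u.length → ∀ p ∈ ps, ¬ p.1 <+: (u.drop j ++ X)) →
      pvScan ps (u ++ X) = u ++ pvScan ps X := by
  intro u
  induction u with
  | nil => intro X _; simp
  | cons c u' ih =>
    intro X h
    have hf : ps.find? (fun p => p.1.isPrefixOf (c :: (u' ++ X))) = none := by
      rw [List.find?_eq_none]
      intro p hp
      simp only [Bool.not_eq_true]
      by_contra hcon
      simp only [Bool.not_eq_false] at hcon
      exact h 0 (by simp) p hp (by simpa using List.isPrefixOf_iff_prefix.mp hcon)
    simp only [List.cons_append]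
    rw [pv_scan_cons_none ps c (u' ++ X) hf,
        ih X (fun j hj p hp => by simpa using h (j+1) (by simp; omega) p hp)]

-- the scanner creates no new occurrence of a key suffix at the front
lemma pv_scan_noNew (ps : List (List Char × List Char)) (hne : ∀ p ∈ ps, p.1 ≠ [])
    (k : List Char)
    (h4 : ∀ m, m < k.length → ∀ p ∈ ps, ¬ (k.drop m) <+: p.2 ∧ ¬ p.2 <+: (k.drop m)) :
    ∀ (l : List Char) (m : Nat), m < k.length → (k.drop m) <+: pvScan ps l → (k.drop m) <+: l := by
  intro l
  induction l with
  | nil =>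
    intro m hm hp
    rw [pv_scan_nil] at hp
    have : k.drop m = [] := List.prefix_nil.mp hp
    have : k.length - m = 0 := by simpa [List.length_drop] using congrArg List.length this
    omega
  | cons c t ih =>
    intro m hm hp
    cases hf : ps.find? (fun p => p.1.isPrefixOf (c :: t)) with
    | some p =>
      rw [pv_scan_cons_some ps hne c t p hf] at hp
      have hcmp := List.prefix_or_prefix_of_prefix hp (List.prefix_append p.2 _)
      have hmem := List.mem_of_find?_eq_some hf
      rcases hcmp with hc | hc
      · exact absurd hc (h4 m hm p hmem).1
      · exact absurd hc (h4 m hm p hmem).2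
    | none =>
      rw [pv_scan_cons_none ps c t hf] at hp
      rw [List.drop_eq_getElem_cons hm] at hp ⊢
      rw [List.cons_prefix_cons] at hp ⊢
      refine ⟨hp.1, ?_⟩
      by_cases hm1 : m + 1 < k.length
      · exact ih (m+1) hm1 hp.2
      · have : k.drop (m+1) = [] := by
          apply List.drop_eq_nil_of_le; omega
        rw [this]; exact List.nil_prefix

-- one sequential replace pass on the scanner's output extends the scanner by one pair
lemma pv_step (ps : List (List Char × List Char)) (k v : List Char)
    (hkne : k ≠ [])
    (hne : ∀ p ∈ ps, p.1 ≠ [])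
    (h2 : ∀ m, 1 ≤ m → m < k.length → ∀ p ∈ ps, ¬ p.1 <+: k.drop m ∧ ¬ k.drop m <+: p.1)
    (h3 : ∀ p ∈ ps, ∀ j, j < p.2.length → ¬ k <+: p.2.drop j ∧ ¬ p.2.drop j <+: k)
    (h4 : ∀ m, m < k.length → ∀ p ∈ ps, ¬ (k.drop m) <+: p.2 ∧ ¬ p.2 <+: (k.drop m)) :
    ∀ (l : List Char), PySem.Chars.replace (pvScan ps l) k v = pvScan (ps ++ [(k, v)]) l := by
  have hone : 1 ≤ k.length := by
    cases hk : k with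
    | nil => exact absurd hk hkne
    | cons a b => simp
  have hne' : ∀ p ∈ ps ++ [(k, v)], p.1 ≠ [] := by
    intro p hp
    rcases List.mem_append.mp hp with h | h
    · exact hne p h
    · simp at h; subst h; exact hkne
  have main : ∀ (n : Nat) (l : List Char), l.length ≤ n →
      PySem.Chars.replace (pvScan ps l) k v = pvScan (ps ++ [(k, v)]) l := by
    intro n
    induction n using Nat.strong_induction_on with
    | _ n ih =>
      intro l hlen
      cases l with
      | nil => rw [pv_scan_nil, pv_scan_nil, pv_rep_nil k v hkne]
      | cons c t =>
        have hn : 1 ≤ n := by simp at hlen; omega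
        cases hf : ps.find? (fun p => p.1.isPrefixOf (c :: t)) with
        | some p =>
          have hf' : (ps ++ [(k, v)]).find? (fun p => p.1.isPrefixOf (c :: t)) = some p := by
            rw [List.find?_append, hf]; rfl
          have hmem := List.mem_of_find?_eq_some hf
          have hp1 : p.1 <+: (c :: t) := by
            have := List.find?_some hf
            exact List.isPrefixOf_iff_prefix.mp this
          have hp1one : 1 ≤ p.1.length := by
            have := hne p hmem
            cases hp : p.1 with
            | nil => exact absurd hp this
            | cons a b => simp
          rw [pv_scan_cons_some ps hne c t p hf,
              pv_scan_cons_some _ hne' c t p hf']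
          rw [pv_rep_append k v hkne p.2 _ ?hsafe]
          · congr 1
            apply ih (n - 1) (by omega)
            simp [List.length_drop]; simp at hlen; omega
          case hsafe =>
            intro j hj hcon
            have hcmp := List.prefix_or_prefix_of_prefix hcon (List.prefix_append (p.2.drop j) _)
            rcases hcmp with hc | hc
            · exact (h3 p hmem j hj).1 hc
            · exact (h3 p hmem j hj).2 hc
        | none =>
          by_cases hk : k.isPrefixOf (c :: t)
          · -- the new key matches here
            have hf' : (ps ++ [(k, v)]).find? (fun p => p.1.isPrefixOf (c :: t)) = some (k, v) := by
              rw [List.find?_append, hf]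
              simp [hk]
            have hkpre : k <+: (c :: t) := List.isPrefixOf_iff_prefix.mp hk
            have hsplit : (c :: t) = k ++ (c :: t).drop k.length := by
              conv_lhs => rw [← List.take_append_drop k.length (c :: t)]
              congr 1
              exact (List.prefix_iff_eq_take.mp hkpre).symm
            rw [pv_scan_cons_some _ hne' c t (k, v) hf']
            have hthrough : pvScan ps (c :: t) = k ++ pvScan ps ((c :: t).drop k.length) := by
              conv_lhs => rw [hsplit]
              apply pv_scan_through ps hne
              intro j hj p hp hcon
              rcases Nat.eq_zero_or_pos j with hj0 | hj0
              · subst hj0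
                simp only [List.drop_zero, ← hsplit] at hcon
                have := List.find?_eq_none.mp hf p hp
                simp only [Bool.not_eq_true] at this
                rw [List.isPrefixOf_iff_prefix.symm] at hcon
                simp [this] at hcon
              · have hcmp := List.prefix_or_prefix_of_prefix hcon (List.prefix_append (k.drop j) _)
                rcases hcmp with hc | hc
                · exact (h2 j hj0 hj p hp).1 hc
                · exact (h2 j hj0 hj p hp).2 hc
            rw [hthrough]
            have hkp2 : k.isPrefixOf (k ++ pvScan ps ((c :: t).drop k.length)) = true :=
              List.isPrefixOf_iff_prefix.mpr (List.prefix_append k _)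
            rw [pv_rep_pos k v _ hkne hkp2, List.drop_left]
            congr 1
            apply ih (n - 1) (by omega)
            simp [List.length_drop]; simp at hlen; omega
          · -- no key at all matches at this position
            have hf' : (ps ++ [(k, v)]).find? (fun p => p.1.isPrefixOf (c :: t)) = none := by
              rw [List.find?_append, hf]
              simp [hk]
            rw [pv_scan_cons_none ps c t hf]
            have hnp : k.isPrefixOf (c :: pvScan ps t) = false := by
              by_contra hcon
              simp only [Bool.not_eq_false] at hcon
              have hk' : k <+: pvScan ps (c :: t) := by
                rw [pv_scan_cons_none ps c t hf]
                exact List.isPrefixOf_iff_prefix.mp hcon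
              have hback := pv_scan_noNew ps hne k h4 (c :: t) 0 (by omega) (by simpa using hk')
              simp only [List.drop_zero] at hback
              exact hk (List.isPrefixOf_iff_prefix.mpr hback)
            rw [pv_rep_neg k v c _ hkne hnp]
            rw [pv_scan_cons_none _ c t hf']
            congr 1
            apply ih (n - 1) (by omega)
            simp only [List.length_cons] at hlen; omega
  intro l
  exact main l.length l (le_refl _)

-- the "if eng in text" guard is redundant: replace is the identity when the key is absent
lemma pv_guard (acc k v : List Char) (hk : k ≠ []) :
    (if PySem.Chars.isIn k acc = true then PySem.Chars.replace acc k v else acc)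
      = PySem.Chars.replace acc k v := by
  cases h : PySem.Chars.isIn k acc
  · simp only [Bool.false_eq_true, if_neg, not_false_iff]
    exact (pv_rep_not_in k v acc hk h).symm
  · simp

lemma pv_fold_guard (ps : List (List Char × List Char)) (hne : ∀ p ∈ ps, p.1 ≠ []) :
    ∀ l, ps.foldl (fun acc p => if PySem.Chars.isIn p.1 acc = true then PySem.Chars.replace acc p.1 p.2 else acc) l
      = ps.foldl (fun acc p => PySem.Chars.replace acc p.1 p.2) l := by
  induction ps with
  | nil => intro l; rfl
  | cons p ps ih =>
    intro l
    simp only [List.foldl_cons]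
    rw [pv_guard l p.1 p.2 (hne p (by simp))]
    exact ih (fun q hq => hne q (by simp [hq])) _

-- chaining the seven replace passes into the seven-key scanner
lemma pv_main (l : List Char) :
    pvTableB.foldl (fun acc p => PySem.Chars.replace acc p.1 p.2) l = pvScan pvTableB l := by
  have h1 : PySem.Chars.replace l "Shop Now".toList "Comprar Ahora".toList
      = pvScan (pvTableB.take 1) l := by
    have h0 := pv_step [] "Shop Now".toList "Comprar Ahora".toList (by decide) (by decide)
      (by decide) (by decide) (by decide) l
    rw [pv_scan_empty] at h0
    simpa [pvTableB] using h0
  have h2 : PySem.Chars.replace (pvScan (pvTableB.take 1) l) "Start Training Now".toList "Empezar a Entrenar Ahora".toList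
      = pvScan (pvTableB.take 2) l := by
    simpa [pvTableB] using pv_step (pvTableB.take 1) "Start Training Now".toList "Empezar a Entrenar Ahora".toList (by decide) (by decide) (by decide) (by decide) (by decide) l
  have h3 : PySem.Chars.replace (pvScan (pvTableB.take 2) l) "Read More".toList "Leer Más".toList
      = pvScan (pvTableB.take 3) l := by
    simpa [pvTableB] using pv_step (pvTableB.take 2) "Read More".toList "Leer Más".toList (by decide) (by decide) (by decide) (by decide) (by decide) l
  have h4 : PySem.Chars.replace (pvScan (pvTableB.take 3) l) "Login".toList "Iniciar Sesión".toList
      = pvScan (pvTableB.take 4) l := by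
    simpa [pvTableB] using pv_step (pvTableB.take 3) "Login".toList "Iniciar Sesión".toList (by decide) (by decide) (by decide) (by decide) (by decide) l
  have h5 : PySem.Chars.replace (pvScan (pvTableB.take 4) l) "Sign Up".toList "Registrarse".toList
      = pvScan (pvTableB.take 5) l := by
    simpa [pvTableB] using pv_step (pvTableB.take 4) "Sign Up".toList "Registrarse".toList (by decide) (by decide) (by decide) (by decide) (by decide) l
  have h6 : PySem.Chars.replace (pvScan (pvTableB.take 5) l) "Dashboard".toList "Panel".toList
      = pvScan (pvTableB.take 6) l := by
    simpa [pvTableB] using pv_step (pvTableB.take 5) "Dashboard".toList "Panel".toList (by decide) (by decide) (by decide) (by decide) (by decide) l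
  have h7 : PySem.Chars.replace (pvScan (pvTableB.take 6) l) "Settings".toList "Configuración".toList
      = pvScan pvTableB l := by
    simpa [pvTableB] using pv_step (pvTableB.take 6) "Settings".toList "Configuración".toList (by decide) (by decide) (by decide) (by decide) (by decide) l
  conv_lhs => simp only [pvTableB, List.foldl_cons, List.foldl_nil]
  rw [h1, h2, h3, h4, h5, h6, h7]

-- the String-level fold of port A computes the List-Char-level fold
lemma pv_bridge (ps : List (String × String)) :
    ∀ (s : String),
      (ps.foldl (fun acc p => if PySem.Str.isIn p.1 acc then PySem.Str.replace acc p.1 p.2 else acc) s).toList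
        = (ps.map (fun p => (p.1.toList, p.2.toList))).foldl
            (fun acc p => if PySem.Chars.isIn p.1 acc = true then PySem.Chars.replace acc p.1 p.2 else acc) s.toList := by
  induction ps with
  | nil => intro s; rfl
  | cons p ps ih =>
    intro s
    simp only [List.foldl_cons, List.map_cons]
    have hstep : (if PySem.Str.isIn p.1 s then PySem.Str.replace s p.1 p.2 else s).toList
        = (if PySem.Chars.isIn p.1.toList s.toList = true
            then PySem.Chars.replace s.toList p.1.toList p.2.toList else s.toList) := by
      cases h : PySem.Chars.isIn p.1.toList s.toList <;>
        simp [PySem.Str.isIn_eq, h, PySem.Str.toList_replace]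
    rw [ih, hstep]

-- ===== VERDICT (by name: the statement is the Claim_ definition above) =====
theorem fallback_translation_spec : Claim_equal_fallback_translation := by
  intro text tl _
  unfold Spec_fallback_translation fallback_translation fallback_translation_alt
  cases h : tl == "Spanish" with
  | false => simp [bne, h]
  | true =>
    simp only [h, if_pos, bne, Bool.not_true, Bool.false_eq_true, if_neg, not_false_iff]
    have hb := congrArg String.ofList (pv_bridge pvTableA text)
    rw [String.ofList_toList] at hb
    rw [hb]
    have hmap : pvTableA.map (fun p => (p.1.toList, p.2.toList)) = pvTableB := by decide
    exact congrArg String.ofList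
      (by rw [hmap, pv_fold_guard pvTableB (by decide), pv_main]; rfl)
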